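-- pv_equiv track=rewrite | github.com/CODING2255/Real-Time-Multi-Speaker-Processing | utils/diarizer.py | simulate_speaker_diarization
-- ===== SOURCE A (Python) =====
-- def simulate_speaker_diarization(transcript):
--     """
--     Simulates speaker diarization by splitting sentences and assigning them
--     alternately to Speaker 1 and Speaker 2.
--
--     Returns:
--         A list of (speaker, sentence) tuples in chronological order.
--     """
--     # Split by period and filter empty parts
--     sentences = [s.strip() for s in transcript.split(". ") if s.strip()]
--
--     speaker_chunks = []
--     speaker = 1
--
--     for i, sentence in enumerate(sentences):
--         speaker_name = f"Speaker {speaker}"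
--         # Ensure sentence ends with a period
--         formatted = sentence if sentence.endswith(".") else sentence + "."
--         speaker_chunks.append((speaker_name, formatted))
--
--         # Alternate speaker every 2 sentences
--         if (i + 1) % 2 == 0:
--             speaker = 2 if speaker == 1 else 1
--
--     return speaker_chunks
-- ===== SOURCE B (Python) =====
-- def simulate_speaker_diarization(transcript):
--     """
--     Simulates speaker diarization by splitting sentences and assigning them
--     alternately to Speaker 1 and Speaker 2.
--
--     Returns:
--         A list of (speaker, sentence) tuples in chronological order.
--     """
--     sentences = [s.strip() for s in transcript.split(". ") if s.strip()]
--     # Consume the sentences two at a time: group g (0-based) belongs to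
--     # Speaker 1 when g is even, Speaker 2 when g is odd.
--     chunks = []
--     g = 0
--     ss = sentences
--     while ss:
--         name = "Speaker 1" if g % 2 == 0 else "Speaker 2"
--         chunks.extend((name, s if s.endswith(".") else s + ".") for s in ss[:2])
--         ss = ss[2:]
--         g += 1
--     return chunks
-- ===== Notes on version B (the rewrite author's own statement) =====
-- stated objective: alternative
-- what changed: Replaces A's single indexed loop with a toggled speaker state variable by pair-chunking: a loop that consumes the sentence list two at a time, labelling each two-sentence chunk from its group number's parity, with no enumeration and no toggle.
import Mathlib
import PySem

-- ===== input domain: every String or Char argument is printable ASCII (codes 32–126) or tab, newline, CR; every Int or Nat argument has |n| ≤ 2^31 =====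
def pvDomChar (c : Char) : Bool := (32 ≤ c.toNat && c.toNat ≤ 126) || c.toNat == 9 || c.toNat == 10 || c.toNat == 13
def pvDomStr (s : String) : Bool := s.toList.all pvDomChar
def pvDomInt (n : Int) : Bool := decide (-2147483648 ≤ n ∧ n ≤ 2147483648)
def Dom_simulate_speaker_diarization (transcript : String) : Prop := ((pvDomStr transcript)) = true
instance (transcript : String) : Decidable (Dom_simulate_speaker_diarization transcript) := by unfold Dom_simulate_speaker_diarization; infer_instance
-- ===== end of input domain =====

-- B replaces A's indexed loop with a toggled speaker state by pair-chunking: a loop that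
-- consumes the sentence list two at a time, labelling each two-sentence group from its
-- group number's parity (alternative decomposition, same cost).

-- ===== PORT A =====
def simulate_speaker_diarization (transcript : String) : List (String × String) :=
  -- sentences = [s.strip() for s in transcript.split(". ") if s.strip()]
  let sentences := (((PySem.Str.split? transcript ". ").getD []).filter
      (fun s => PySem.Str.strip s ≠ "")).map (fun s => PySem.Str.strip s)
  -- loop with state (speaker, speaker_chunks), toggling speaker every 2 sentences
  let r := (PySem.List.enumerate sentences 0).foldl
      (fun (st : Int × List (String × String)) p =>
        (if PySem.Int.mod (p.1 + 1) 2 == 0 then (if st.1 == 1 then (2 : Int) else 1) else st.1,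
         st.2 ++ [("Speaker " ++ PySem.Int.toStr st.1,
                   if PySem.Str.endswith p.2 "." then p.2 else p.2 ++ ".")]))
      ((1 : Int), ([] : List (String × String)))
  r.2

-- ===== PORT B =====
-- the while loop of B: state (ss, g, chunks); each iteration labels ss[:2] from g's parity
-- and continues on ss[2:]  (ss[:2] / ss[2:] ported as List.take 2 / List.drop 2)
def pvGroups (ss : List String) (g : Int) (chunks : List (String × String)) :
    List (String × String) :=
  if h : ss = [] then chunks
  else
    let name := if PySem.Int.mod g 2 == 0 then "Speaker 1" else "Speaker 2"
    pvGroups (ss.drop 2) (g + 1)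
      (chunks ++ (ss.take 2).map
        (fun s => (name, if PySem.Str.endswith s "." then s else s ++ ".")))
termination_by ss.length
decreasing_by
  cases ss with
  | nil => exact absurd rfl h
  | cons a t => simp

def simulate_speaker_diarization_alt (transcript : String) : List (String × String) :=
  let sentences := (((PySem.Str.split? transcript ". ").getD []).filter
      (fun s => PySem.Str.strip s ≠ "")).map (fun s => PySem.Str.strip s)
  pvGroups sentences 0 []

-- ===== PRECONDITION & SPEC =====
def Spec_simulate_speaker_diarization (transcript : String) (out : List (String × String)) : Prop := out = simulate_speaker_diarization_alt transcript
instance (transcript : String) (out : List (String × String)) : Decidable (Spec_simulate_speaker_diarization transcript out) := by unfold Spec_simulate_speaker_diarization; infer_instance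

-- ===== CLAIM (what is proved, stated in full; the proofs are below) =====
def Claim_equal_simulate_speaker_diarization : Prop := ∀ (transcript : String), Dom_simulate_speaker_diarization transcript → Spec_simulate_speaker_diarization transcript (simulate_speaker_diarization transcript)

-- ===== LEMMAS AND PROOFS =====

-- A's loop body, named for the lemmas below (definitionally the fold function of port A)
def pvF : (Int × List (String × String)) → (Int × String) → (Int × List (String × String)) :=
  fun st p =>
    (if PySem.Int.mod (p.1 + 1) 2 == 0 then (if st.1 == 1 then (2 : Int) else 1) else st.1,
     st.2 ++ [("Speaker " ++ PySem.Int.toStr st.1,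
               if PySem.Str.endswith p.2 "." then p.2 else p.2 ++ ".")])

-- the speaker number of group g in A's loop
def pvSpk (g : Int) : Int := if PySem.Int.mod g 2 == 0 then (1 : Int) else 2

lemma pv_name (g : Int) :
    "Speaker " ++ PySem.Int.toStr (pvSpk g)
      = (if PySem.Int.mod g 2 == 0 then "Speaker 1" else "Speaker 2") := by
  unfold pvSpk; split_ifs <;> decide

lemma pv_step_a (g : Int) (acc : List (String × String)) (a : String) :
    pvF (pvSpk g, acc) (2 * g, a)
      = (pvSpk g, acc ++ [("Speaker " ++ PySem.Int.toStr (pvSpk g),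
          if PySem.Str.endswith a "." then a else a ++ ".")]) := by
  simp only [pvF]
  rw [if_neg]
  rw [PySem.Int.mod_eq_emod_of_pos (show (0:Int) < 2 by norm_num)]
  simp only [beq_iff_eq]
  omega

lemma pv_step_b (g : Int) (acc : List (String × String)) (b : String) :
    pvF (pvSpk g, acc) (2 * g + 1, b)
      = (pvSpk (g + 1), acc ++ [("Speaker " ++ PySem.Int.toStr (pvSpk g),
          if PySem.Str.endswith b "." then b else b ++ ".")]) := by
  simp only [pvF]
  rw [if_pos]
  · unfold pvSpk
    simp only [PySem.Int.mod_eq_emod_of_pos (show (0:Int) < 2 by norm_num), beq_iff_eq]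
    split_ifs <;> first | rfl | omega
  · rw [PySem.Int.mod_eq_emod_of_pos (show (0:Int) < 2 by norm_num)]
    simp only [beq_iff_eq]
    omega

lemma pv_loop (n : Nat) : ∀ (ss : List String), ss.length ≤ n → ∀ (g : Int),
    ∀ (acc : List (String × String)),
    ((PySem.List.enumerate ss (2 * g)).foldl pvF (pvSpk g, acc)).2 = pvGroups ss g acc := by
  induction n with
  | zero =>
      intro ss hss g acc
      have : ss = [] := List.length_eq_zero_iff.mp (Nat.le_zero.mp hss)
      subst this
      rw [pvGroups]
      simp [PySem.List.enumerate_nil]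
  | succ n ih =>
      intro ss hss g acc
      match ss with
      | [] =>
          rw [pvGroups]
          simp [PySem.List.enumerate_nil]
      | [a] =>
          rw [pvGroups]
          rw [PySem.List.enumerate_cons, PySem.List.enumerate_nil]
          simp only [List.foldl_cons, List.foldl_nil, pv_step_a g acc a]
          rw [pvGroups]
          simp [pv_name g]
      | a :: b :: rest =>
          rw [pvGroups]
          rw [PySem.List.enumerate_cons, PySem.List.enumerate_cons]
          simp only [List.foldl_cons]
          rw [pv_step_a g acc a, pv_step_b g _ b]
          rw [show (2 : Int) * g + 1 + 1 = 2 * (g + 1) by ring]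
          rw [ih rest (by simp at hss; omega) (g + 1)]
          simp [pv_name g]

-- ===== VERDICT (by name: the statement is the Claim_ definition above) =====
theorem simulate_speaker_diarization_spec : Claim_equal_simulate_speaker_diarization := by
  intro t _
  show _ = _
  exact pv_loop _ _ le_rfl 0 []
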